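-- pv_equiv track=rewrite | github.com/556isback/optionCombo | optionCombo/func.py | correct_form
-- ===== SOURCE A (Python) =====
-- def is_two_dimensional(lst):
--     if isinstance(lst, list):
--         return all(isinstance(elem, list) for elem in lst)
--     return False
--
-- def has_same_form(list1, list2):
--     if len(list1) != len(list2):
--         return False
--
--     for item1, item2 in zip(list1, list2):
--         if type(item1) != type(item2):
--             return False
--         if isinstance(item1, list) and isinstance(item2, list):
--             if not has_same_form(item1, item2):
--                 return False
--     return True
--
-- def correct_form(list1, list2):
--     if len(list1) != len(list2):
--         return False
--     for i,j in zip(list1,list2):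
--         if is_two_dimensional(j):
--             for ele in j:
--                 if not has_same_form(i,ele):
--                     return False
--         else:
--             if not has_same_form(i,j):
--                 return False
--     return True
-- ===== SOURCE B (Python) =====
-- def correct_form(list1, list2):
--     # In the typed domain (list1: list of int-lists, list2: list of lists of
--     # int-lists), structure agreement collapses to a length comparison:
--     # every sublist of each j must have the same length as the paired i.
--     return len(list1) == len(list2) and all(
--         len(ele) == len(i) for i, j in zip(list1, list2) for ele in j
--     )
-- ===== Notes on version B (the rewrite author's own statement) =====
-- stated objective: simpler
-- what changed: Replaced the recursive has_same_form/is_two_dimensional helper machinery with a single flat comprehension over zip(list1,list2): on the typed domain the structural check reduces to comparing sublist lengths, so B is one short expression with no recursion and no helper functions.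
import Mathlib
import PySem

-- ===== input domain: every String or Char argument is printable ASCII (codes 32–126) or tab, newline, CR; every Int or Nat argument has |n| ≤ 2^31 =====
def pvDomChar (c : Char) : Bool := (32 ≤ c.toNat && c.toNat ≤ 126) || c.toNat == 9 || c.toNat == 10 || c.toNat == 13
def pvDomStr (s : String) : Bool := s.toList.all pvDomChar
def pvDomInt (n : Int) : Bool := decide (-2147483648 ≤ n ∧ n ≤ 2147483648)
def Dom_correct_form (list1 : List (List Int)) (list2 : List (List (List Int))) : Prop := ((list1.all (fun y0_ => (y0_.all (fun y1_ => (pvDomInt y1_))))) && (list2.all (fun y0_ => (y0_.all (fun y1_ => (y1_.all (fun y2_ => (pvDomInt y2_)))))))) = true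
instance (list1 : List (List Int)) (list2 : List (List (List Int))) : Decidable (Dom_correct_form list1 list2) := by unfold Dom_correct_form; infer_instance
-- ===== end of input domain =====

-- B inlines and flattens A's recursive helper machinery into one length-comparison expression (objective: simpler).


-- ===== PORT A =====
-- On the typed domain every `elem` of a List (List Int) is a list, so Python's
-- `isinstance(elem, list)` is literally `true` for each element.
def is_two_dimensional (lst : List (List Int)) : Bool :=
  lst.all (fun _elem => true)

-- has_same_form on two int-lists: types always match and items are never lists,
-- so the loop body never returns False.
def has_same_form_ii (l1 l2 : List Int) : Bool :=
  if l1.length ≠ l2.length then false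
  else (l1.zip l2).all (fun _p => true)

-- has_same_form on an int-list vs a list of int-lists (the `else` branch call):
-- `type(item1) != type(item2)` holds for every zipped pair, so each pair returns False.
def has_same_form_mixed (l1 : List Int) (l2 : List (List Int)) : Bool :=
  if l1.length ≠ l2.length then false
  else (l1.zip l2).all (fun _p => false)

def correct_form (list1 : List (List Int)) (list2 : List (List (List Int))) : Bool :=
  if list1.length ≠ list2.length then false
  else (list1.zip list2).all (fun ij =>
    if is_two_dimensional ij.2 then
      ij.2.all (fun ele => has_same_form_ii ij.1 ele)
    else
      has_same_form_mixed ij.1 ij.2)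

-- ===== PORT B =====
def correct_form_alt (list1 : List (List Int)) (list2 : List (List (List Int))) : Bool :=
  (list1.length == list2.length) &&
    (list1.zip list2).all (fun ij => ij.2.all (fun ele => ele.length == ij.1.length))

-- ===== PRECONDITION & SPEC =====
def Spec_correct_form (list1 : List (List Int)) (list2 : List (List (List Int))) (out : Bool) : Prop := out = correct_form_alt list1 list2
instance (list1 : List (List Int)) (list2 : List (List (List Int))) (out : Bool) : Decidable (Spec_correct_form list1 list2 out) := by unfold Spec_correct_form; infer_instance

-- ===== CLAIM (what is proved, stated in full; the proofs are below) =====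
def Claim_equal_correct_form : Prop := ∀ (list1 : List (List Int)) (list2 : List (List (List Int))), Dom_correct_form list1 list2 → Spec_correct_form list1 list2 (correct_form list1 list2)

-- ===== LEMMAS AND PROOFS =====
theorem has_same_form_ii_eq (l1 l2 : List Int) :
    has_same_form_ii l1 l2 = (l2.length == l1.length) := by
  by_cases h : l1.length = l2.length
  · simp [has_same_form_ii, h]
  · simp [has_same_form_ii, h]
    omega

theorem is_two_dimensional_true (l : List (List Int)) : is_two_dimensional l = true := by
  simp [is_two_dimensional]

-- ===== VERDICT (by name: the statement is the Claim_ definition above) =====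
theorem correct_form_spec : Claim_equal_correct_form := by
  intro list1 list2 _
  unfold Spec_correct_form correct_form correct_form_alt
  by_cases h : list1.length = list2.length
  · simp [h, is_two_dimensional_true, has_same_form_ii_eq]
  · simp [h]
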